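-- pv_equiv track=rewrite | github.com/wanghengquan/repository | tmp_client/tools/core_scripts/tools/runDownload/run_download.py | get_vertical_sites_from_ports
-- ===== SOURCE A (Python) =====
-- def get_vertical_sites_from_ports(ports, ports_dict):
--     """
--     Maximum sites length is 7
--     :param ports:
--     :param ports_dict:
--     :return:
--     """
--     longest_site = 7
--     sites = list()
--     for port in ports:
--         _dict = ports_dict.get(port)
--         _site = _dict.get("Site")
--         sites.append(_site)
--     target_sites = list()
--     for i in range(longest_site):
--         _list = list()
--         for foo in sites:
--             try:
--                 _char = foo[i]
--             except IndexError:
--                 _char = " "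
--             _list.append(_char)
--         target_sites.append(_list)
--     return target_sites
-- ===== SOURCE B (Python) =====
-- def get_vertical_sites_from_ports(ports, ports_dict):
--     """Pad-then-transpose: normalize every site to exactly 7 chars, then zip."""
--     sites = [ports_dict[port]["Site"] for port in ports]
--     if not sites:
--         return [[] for _ in range(7)]
--     padded = [s.ljust(7)[:7] for s in sites]
--     return [list(col) for col in zip(*padded)]
-- ===== Notes on version B (the rewrite author's own statement) =====
-- stated objective: idiomatic
-- what changed: Replaces the per-position inner loop with try/except IndexError control flow by normalizing each site to exactly 7 characters (ljust + slice) and transposing with zip(*padded).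
import Mathlib
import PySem

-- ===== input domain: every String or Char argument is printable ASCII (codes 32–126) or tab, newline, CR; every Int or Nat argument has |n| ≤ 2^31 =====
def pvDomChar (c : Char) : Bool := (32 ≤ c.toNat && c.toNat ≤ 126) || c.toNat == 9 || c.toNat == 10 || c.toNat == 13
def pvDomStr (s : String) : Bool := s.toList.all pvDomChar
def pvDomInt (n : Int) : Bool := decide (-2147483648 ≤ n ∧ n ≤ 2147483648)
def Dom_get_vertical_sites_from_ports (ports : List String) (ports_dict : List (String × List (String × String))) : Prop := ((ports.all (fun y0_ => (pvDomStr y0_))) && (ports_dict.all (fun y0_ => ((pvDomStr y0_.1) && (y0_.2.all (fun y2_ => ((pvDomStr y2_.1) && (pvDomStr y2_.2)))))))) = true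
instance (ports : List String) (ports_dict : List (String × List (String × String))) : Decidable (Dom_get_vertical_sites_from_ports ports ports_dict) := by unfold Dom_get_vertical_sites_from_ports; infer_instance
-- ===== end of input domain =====

-- B pads every site string to exactly 7 characters and transposes with zip(*), replacing
-- A's per-position probing with try/except IndexError; same complexity, more idiomatic.

-- ===== PORT A =====
-- first loop of A: sites.append(ports_dict.get(port).get("Site")); `none` = the raising runs
def pvGatherA : List String → List (String × List (String × String)) → Option (List String)
  | [], _ => some []
  | p :: rest, pd =>
    match (pd.lookup p).bind (fun d => d.lookup "Site") with
    | none => none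
    | some s => (pvGatherA rest pd).map (fun sites => s :: sites)

def get_vertical_sites_from_ports (ports : List String) (ports_dict : List (String × List (String × String))) : List (List String) :=
  match pvGatherA ports ports_dict with
  | none => []   -- A raises here (AttributeError/TypeError); excluded by Pre_
  | some sites =>
    (PySem.List.pyRange 0 7 1).map (fun i =>
      sites.map (fun foo =>
        match PySem.Str.pyGet? foo i with
        | some c => String.ofList [c]
        | none => " "))

-- ===== PORT B =====
-- the comprehension [ports_dict[port]["Site"] for port in ports]; `none` = the raising runs
def pvGatherB (ports : List String) (pd : List (String × List (String × String))) : Option (List String) :=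
  ports.mapM (fun p => (pd.lookup p).bind (fun d => d.lookup "Site"))

-- hand port of Python's variadic zip(*rows) (exact: truncates to the shortest row)
def pvZipStar : List (List Char) → List (List Char)
  | [] => []
  | [r] => r.map (fun c => [c])
  | r :: rest => List.zipWith (· :: ·) r (pvZipStar rest)

def get_vertical_sites_from_ports_alt (ports : List String) (ports_dict : List (String × List (String × String))) : List (List String) :=
  match pvGatherB ports ports_dict with
  | none => []   -- B raises here (KeyError); excluded by Pre_
  | some sites =>
    if sites.isEmpty then List.replicate 7 []
    else
      let padded := sites.map (fun s => s.toList.takeD 7 ' ')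
      (pvZipStar padded).map (fun col => col.map (fun c => String.ofList [c]))

-- ===== PRECONDITION & SPEC =====
-- Pre_ excludes exactly the inputs on which the Python A raises: some port is missing from
-- ports_dict (AttributeError on None.get) or its dict has no "Site" key (TypeError on None[i]).
def Pre_get_vertical_sites_from_ports (ports : List String) (ports_dict : List (String × List (String × String))) : Prop :=
  ∀ p ∈ ports, (((ports_dict.lookup p).bind (fun d => d.lookup "Site")).isSome = true)
instance (ports : List String) (ports_dict : List (String × List (String × String))) : Decidable (Pre_get_vertical_sites_from_ports ports ports_dict) := by unfold Pre_get_vertical_sites_from_ports; infer_instance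

def pvWitness_get_vertical_sites_from_ports : List String × (List (String × List (String × String))) :=
  (["p1", "p2"], [("p1", [("Site", "AB")]), ("p2", [("Site", "longsitename")])])

def Spec_get_vertical_sites_from_ports (ports : List String) (ports_dict : List (String × List (String × String))) (out : List (List String)) : Prop := out = get_vertical_sites_from_ports_alt ports ports_dict
instance (ports : List String) (ports_dict : List (String × List (String × String))) (out : List (List String)) : Decidable (Spec_get_vertical_sites_from_ports ports ports_dict out) := by unfold Spec_get_vertical_sites_from_ports; infer_instance

-- ===== CLAIM (what is proved, stated in full; the proofs are below) =====
def Claim_equal_get_vertical_sites_from_ports : Prop := ∀ (ports : List String) (ports_dict : List (String × List (String × String))), Dom_get_vertical_sites_from_ports ports ports_dict → Pre_get_vertical_sites_from_ports ports ports_dict → Spec_get_vertical_sites_from_ports ports ports_dict (get_vertical_sites_from_ports ports ports_dict)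

-- ===== LEMMAS AND PROOFS =====

-- the two gathering loops compute the same optional site list
lemma pvGather_eq (ports : List String) (pd : List (String × List (String × String))) :
    pvGatherB ports pd = pvGatherA ports pd := by
  induction ports with
  | nil => rfl
  | cons p rest ih =>
    simp only [pvGatherB, List.mapM_cons] at *
    cases h : (pd.lookup p).bind (fun d => d.lookup "Site") with
    | none => simp [pvGatherA, h]
    | some s =>
      simp [pvGatherA, h, ← ih]
      cases rest.mapM (fun p => (pd.lookup p).bind (fun d => d.lookup "Site")) <;> rfl

lemma pvTakeD_getD {α : Type} (n : Nat) (l : List α) (d : α) (i : Nat) (h : i < n) :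
    (l.takeD n d).getD i d = l.getD i d := by
  induction n generalizing i l with
  | zero => omega
  | succ n ih =>
    rw [List.takeD_succ]
    cases i with
    | zero => cases l <;> rfl
    | succ i =>
      simp only [List.getD_cons_succ, ih l.tail i (by omega)]
      cases l with
      | nil => simp [List.getD]
      | cons x xs => rfl

-- zip(*rows) on a nonempty family of rows all of length n is column extraction
lemma pvZipStar_uniform (n : Nat) (ls : List (List Char)) (hne : ls ≠ [])
    (hlen : ∀ r ∈ ls, r.length = n) :
    pvZipStar ls = (List.range n).map (fun i => ls.map (fun r => r.getD i ' ')) := by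
  induction ls with
  | nil => exact absurd rfl hne
  | cons r rest ih =>
    have hr : r.length = n := hlen r (by simp)
    cases rest with
    | nil =>
      apply List.ext_getElem
      · simp [pvZipStar, hr]
      · intro i h1 h2
        have hi : i < r.length := by simpa [pvZipStar] using h1
        simp only [pvZipStar, List.getElem_map, List.getElem_range, List.map_cons, List.map_nil]
        rw [List.getD_eq_getElem r ' ' hi]
    | cons r2 rest2 =>
      have ih' := ih (by simp) (fun q hq => hlen q (List.mem_cons_of_mem r hq))
      show List.zipWith (· :: ·) r (pvZipStar (r2 :: rest2)) = _
      rw [ih']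
      apply List.ext_getElem
      · simp [hr]
      · intro i h1 h2
        have hi : i < n := by simpa using h2
        simp only [List.getElem_zipWith, List.getElem_map, List.getElem_range, List.map_cons]
        rw [List.getD_eq_getElem r ' ' (by omega)]

-- pointwise: A's probed character equals B's padded character, as a 1-char string
lemma pvChar_eq (s : String) (k : Nat) (hk : k < 7) :
    (match PySem.Str.pyGet? s (k : Int) with
      | some c => String.ofList [c]
      | none => " ") = String.ofList [(s.toList.takeD 7 ' ').getD k ' '] := by
  rw [PySem.Str.pyGet?_natCast, pvTakeD_getD 7 _ _ _ hk]
  cases h : s.toList[k]? with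
  | none =>
    have hlen : s.toList.length ≤ k := List.getElem?_eq_none_iff.mp h
    rw [List.getD_eq_default _ _ hlen]
  | some c => simp [List.getD_eq_getElem?_getD, h]

-- under Pre_ the gathering loop cannot hit the raising branch
lemma pvGatherA_isSome (ports : List String) (pd : List (String × List (String × String)))
    (hpre : Pre_get_vertical_sites_from_ports ports pd) : (pvGatherA ports pd).isSome = true := by
  induction ports with
  | nil => rfl
  | cons p rest ih =>
    have hp := hpre p (by simp)
    simp only [pvGatherA]
    cases h : (pd.lookup p).bind (fun d => d.lookup "Site") with
    | none => rw [h] at hp; simp at hp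
    | some s =>
      have := ih (fun q hq => hpre q (List.mem_cons_of_mem p hq))
      cases hg : pvGatherA rest pd with
      | none => rw [hg] at this; simp at this
      | some l => simp

lemma pvRange7 : PySem.List.pyRange 0 7 1 = (List.range 7).map Int.ofNat := by decide

-- ===== VERDICT (by name: the statement is the Claim_ definition above) =====
theorem get_vertical_sites_from_ports_spec : Claim_equal_get_vertical_sites_from_ports := by
  intro ports pd _dom _pre
  unfold Spec_get_vertical_sites_from_ports get_vertical_sites_from_ports get_vertical_sites_from_ports_alt
  rw [pvGather_eq]
  cases hg : pvGatherA ports pd with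
  | none => exact absurd (pvGatherA_isSome ports pd _pre) (by simp [hg])
  | some sites =>
    cases sites with
    | nil => rfl
    | cons s0 srest =>
      simp only [List.isEmpty_cons, Bool.false_eq_true, if_false]
      rw [pvZipStar_uniform 7 ((s0 :: srest).map (fun s => s.toList.takeD 7 ' ')) (by simp)
            (by intro r hr
                rw [List.mem_map] at hr
                obtain ⟨s, _, rfl⟩ := hr
                exact List.takeD_length 7 s.toList ' ')]
      rw [pvRange7, List.map_map, List.map_map]
      apply List.map_congr_left
      intro k hk
      have hk7 : k < 7 := List.mem_range.mp hk
      simp only [Function.comp_apply, List.map_map]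
      apply List.map_congr_left
      intro s _
      simp only [Function.comp_apply]
      exact pvChar_eq s k hk7
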